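-- pv_equiv track=rewrite | github.com/jaeyoungjang2/coding | 14500_2.py | type1
-- ===== SOURCE A (Python) =====
-- def type1(lst, N, M):
--     # 가로 4개 막대기
--     maxNum = 0
--     # ㅁㅁㅁㅁ
--     for i in range(N):
--         for j in range(M-3):
--             tempNum = lst[i][j] + lst[i][j+1] + lst[i][j+2] + lst[i][j+3]
--             if tempNum > maxNum:
--                 maxNum = tempNum
--     # ㅁ
--     # ㅁ
--     # ㅁ
--     # ㅁ
--     for i in range(N-3):
--         for j in range(M):
--             tempNum = lst[i][j] + lst[i+1][j] + lst[i+2][j] + lst[i+3][j]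
--             if tempNum > maxNum:
--                 maxNum = tempNum
--     return maxNum
-- ===== SOURCE B (Python) =====
-- def type1(lst, N, M):
--     best = 0
--
--     def slide(seq, n):
--         nonlocal best
--         s = seq[0] + seq[1] + seq[2] + seq[3]
--         if s > best:
--             best = s
--         for j in range(1, n - 3):
--             s += seq[j + 3] - seq[j - 1]
--             if s > best:
--                 best = s
--
--     if M >= 4:
--         for i in range(N):
--             slide(lst[i], M)
--     if N >= 4:
--         for j in range(M):
--             slide([lst[i][j] for i in range(N)], N)
--     return best
-- ===== Notes on version B (the rewrite author's own statement) =====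
-- stated objective: alternative
-- what changed: Replaces A's recomputation of each 4-cell window from four fresh lookups (in both double scans) by a sliding-window pass per row and, via explicitly built columns, per column, updating the running sum incrementally (add entering cell, subtract leaving cell).
import Mathlib
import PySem

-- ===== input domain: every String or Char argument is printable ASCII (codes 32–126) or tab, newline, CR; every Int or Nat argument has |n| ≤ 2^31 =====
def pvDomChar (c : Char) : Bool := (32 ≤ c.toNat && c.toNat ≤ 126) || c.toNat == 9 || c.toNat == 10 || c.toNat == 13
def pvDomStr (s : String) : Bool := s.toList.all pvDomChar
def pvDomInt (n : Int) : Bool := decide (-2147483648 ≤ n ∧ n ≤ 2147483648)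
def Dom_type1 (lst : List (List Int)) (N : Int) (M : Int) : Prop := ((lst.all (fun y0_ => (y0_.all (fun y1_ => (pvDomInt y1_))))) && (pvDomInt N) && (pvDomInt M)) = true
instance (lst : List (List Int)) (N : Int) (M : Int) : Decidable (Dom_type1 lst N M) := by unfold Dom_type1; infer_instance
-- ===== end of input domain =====

-- B replaces A's four-fresh-lookups-per-window double scans by a sliding-window pass
-- per row and (over explicitly built columns) per column: add the entering cell,
-- subtract the leaving one (objective: alternative).

-- lst[i][j] (all accesses are in range under Pre_; the default 0 stands in for the never-raised IndexError)
def pvCell (lst : List (List Int)) (i j : Int) : Int :=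
  PySem.List.pyGetD (PySem.List.pyGetD lst i []) j 0

-- seq[j]
def pvAt (xs : List Int) (j : Int) : Int := PySem.List.pyGetD xs j 0

-- ===== PORT A =====
def type1 (lst : List (List Int)) (N : Int) (M : Int) : Int :=
  let maxNum : Int := 0
  let maxNum := (PySem.List.pyRange 0 N).foldl (fun maxNum i =>
    (PySem.List.pyRange 0 (M - 3)).foldl (fun maxNum j =>
      let tempNum := pvCell lst i j + pvCell lst i (j+1) + pvCell lst i (j+2) + pvCell lst i (j+3)
      if tempNum > maxNum then tempNum else maxNum) maxNum) maxNum
  (PySem.List.pyRange 0 (N - 3)).foldl (fun maxNum i =>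
    (PySem.List.pyRange 0 M).foldl (fun maxNum j =>
      let tempNum := pvCell lst i j + pvCell lst (i+1) j + pvCell lst (i+2) j + pvCell lst (i+3) j
      if tempNum > maxNum then tempNum else maxNum) maxNum) maxNum

-- ===== PORT B =====
-- slide(seq, n): incremental 4-window sum over seq[0:n], folding the best into `best`
def pvSlide (seq : List Int) (n : Int) (best : Int) : Int :=
  let s := pvAt seq 0 + pvAt seq 1 + pvAt seq 2 + pvAt seq 3
  let best := if s > best then s else best
  ((PySem.List.pyRange 1 (n - 3)).foldl (fun (p : Int × Int) j =>
      let s := p.1 + pvAt seq (j+3) - pvAt seq (j-1)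
      (s, if s > p.2 then s else p.2)) (s, best)).2

def type1_alt (lst : List (List Int)) (N : Int) (M : Int) : Int :=
  let best : Int := 0
  let best := if 4 ≤ M then
      (PySem.List.pyRange 0 N).foldl (fun best i =>
        pvSlide (PySem.List.pyGetD lst i []) M best) best
    else best
  if 4 ≤ N then
    (PySem.List.pyRange 0 M).foldl (fun best j =>
      pvSlide ((PySem.List.pyRange 0 N).map (fun i => pvCell lst i j)) N best) best
  else best

-- ===== PRECONDITION & SPEC =====
-- Pre_: exactly the inputs on which A returns (when some 4-cell window exists, the
-- first N rows must exist and hold at least M cells each; otherwise A touches nothing);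
-- outside it A raises IndexError.
def Pre_type1 (lst : List (List Int)) (N : Int) (M : Int) : Prop :=
  ((4 ≤ M ∧ 1 ≤ N) ∨ (4 ≤ N ∧ 1 ≤ M)) →
    (N ≤ (lst.length : Int) ∧ ∀ row ∈ lst.take N.toNat, M ≤ (row.length : Int))
instance (lst : List (List Int)) (N : Int) (M : Int) : Decidable (Pre_type1 lst N M) := by
  unfold Pre_type1; infer_instance

def pvWitness_type1 : List (List Int) × Int × Int :=
  ([[1, 2, 3, 4], [5, -6, 7, 8]], 2, 4)

def Spec_type1 (lst : List (List Int)) (N : Int) (M : Int) (out : Int) : Prop := out = type1_alt lst N M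
instance (lst : List (List Int)) (N : Int) (M : Int) (out : Int) : Decidable (Spec_type1 lst N M out) := by unfold Spec_type1; infer_instance

-- ===== CLAIM (what is proved, stated in full; the proofs are below) =====
def Claim_equal_type1 : Prop := ∀ (lst : List (List Int)) (N : Int) (M : Int), Dom_type1 lst N M → Pre_type1 lst N M → Spec_type1 lst N M (type1 lst N M)

-- ===== LEMMAS AND PROOFS =====

-- the 4-cell window of xs starting at j
def pvWin (xs : List Int) (j : Int) : Int :=
  pvAt xs j + pvAt xs (j+1) + pvAt xs (j+2) + pvAt xs (j+3)

theorem pv_if_max (a t : Int) : (if t > a then t else a) = max a t := by omega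

theorem pv_foldl_id {α : Type} (l : List α) (b : Int) : l.foldl (fun a _ => a) b = b := by
  induction l with
  | nil => rfl
  | cons x t ih => exact ih

-- the incremental loop of pvSlide computes the running window maximum
theorem pvSlide_loop (xs : List Int) :
    ∀ (n : Nat) (k e b : Int), (e - k).toNat = n →
      ((PySem.List.pyRange k e).foldl (fun (p : Int × Int) j =>
          let s := p.1 + pvAt xs (j+3) - pvAt xs (j-1)
          (s, if s > p.2 then s else p.2)) (pvWin xs (k-1), b)).2
        = ((PySem.List.pyRange k e).map (pvWin xs)).foldl max b := by
  intro n
  induction n with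
  | zero =>
    intro k e b hn
    rw [PySem.List.pyRange_one_eq_nil (by omega)]
    simp
  | succ m ih =>
    intro k e b hn
    rcases (em (e ≤ k)) with h | h
    · rw [PySem.List.pyRange_one_eq_nil h]; simp
    · replace h : k < e := by omega
      rw [PySem.List.pyRange_one_cons h]
      simp only [List.foldl_cons, List.map_cons]
      have hs : pvWin xs (k-1) + pvAt xs (k+3) - pvAt xs (k-1) = pvWin xs k := by
        simp only [pvWin]
        have h1 : k - 1 + 1 = k := by ring
        have h2 : k - 1 + 2 = k + 1 := by ring
        have h3 : k - 1 + 3 = k + 2 := by ring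
        rw [h1, h2, h3]; ring
      rw [hs, show (if pvWin xs k > b then pvWin xs k else b) = max b (pvWin xs k) from by omega]
      have := ih (k+1) e (max b (pvWin xs k)) (by omega)
      rw [show k + 1 - 1 = k from by ring] at this
      exact this

-- pvSlide xs n b is the max of b and the 4-cell windows of xs starting in [0, n-3)
theorem pvSlide_spec (xs : List Int) (n b : Int) (h4 : 4 ≤ n) :
    pvSlide xs n b = ((PySem.List.pyRange 0 (n - 3)).map (pvWin xs)).foldl max b := by
  have h0 : (0:Int) < n - 3 := by omega
  rw [PySem.List.pyRange_one_cons h0, List.map_cons, List.foldl_cons]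
  have hw : pvWin xs 0 = pvAt xs 0 + pvAt xs 1 + pvAt xs 2 + pvAt xs 3 := by norm_num [pvWin]
  simp only [pvSlide]
  have hl := pvSlide_loop xs (n - 3 - 1).toNat 1 (n - 3) (max b (pvWin xs 0)) rfl
  rw [show (1:Int) - 1 = 0 from by ring] at hl
  rw [← hw, show (if pvWin xs 0 > b then pvWin xs 0 else b) = max b (pvWin xs 0) from by omega]
  exact hl

-- A's horizontal double scan = B's guarded per-row slides
theorem pv_rows_eq (lst : List (List Int)) (N M b : Int) :
    (PySem.List.pyRange 0 N).foldl (fun maxNum i =>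
      (PySem.List.pyRange 0 (M - 3)).foldl (fun maxNum j =>
        let tempNum := pvCell lst i j + pvCell lst i (j+1) + pvCell lst i (j+2) + pvCell lst i (j+3)
        if tempNum > maxNum then tempNum else maxNum) maxNum) b
    = (if 4 ≤ M then
        (PySem.List.pyRange 0 N).foldl (fun best i =>
          pvSlide (PySem.List.pyGetD lst i []) M best) b
      else b) := by
  rcases em (4 ≤ M) with h4 | h4
  · rw [if_pos h4]
    refine PySem.List.foldl_congr_mem _ _ _ b ?_
    intro acc i _
    rw [pvSlide_spec _ M acc h4, List.foldl_map]
    simp only [pvWin, pvAt, pvCell, pv_if_max]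
  · rw [if_neg h4]
    have : ∀ (acc : Int) (i : Int), (PySem.List.pyRange 0 (M - 3)).foldl (fun maxNum j =>
        let tempNum := pvCell lst i j + pvCell lst i (j+1) + pvCell lst i (j+2) + pvCell lst i (j+3)
        if tempNum > maxNum then tempNum else maxNum) acc = acc := by
      intro acc i
      rw [PySem.List.pyRange_one_eq_nil (by omega)]
      rfl
    calc (PySem.List.pyRange 0 N).foldl (fun maxNum i =>
        (PySem.List.pyRange 0 (M - 3)).foldl (fun maxNum j =>
          let tempNum := pvCell lst i j + pvCell lst i (j+1) + pvCell lst i (j+2) + pvCell lst i (j+3)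
          if tempNum > maxNum then tempNum else maxNum) maxNum) b
        = (PySem.List.pyRange 0 N).foldl (fun maxNum _ => maxNum) b :=
          PySem.List.foldl_congr_mem _ _ _ b (fun acc i _ => this acc i)
      _ = b := pv_foldl_id _ b

-- interleaving perm: flatten of head-cons lists
theorem pv_cons_flatten_perm (a : Int → Int) (g : Int → List Int) (l : List Int) :
    ((l.map (fun j => a j :: g j)).flatten).Perm (l.map a ++ (l.map g).flatten) := by
  induction l with
  | nil => simp
  | cons j t ih =>
    simp only [List.map_cons, List.flatten_cons, List.cons_append]
    refine List.Perm.cons _ ?_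
    exact (ih.append_left _).trans (List.perm_append_comm_assoc _ _ _)

-- product-order swap permutation
theorem pv_swap_perm (f : Int → Int → Int) (l1 l2 : List Int) :
    ((l1.map (fun i => l2.map (f i))).flatten).Perm
      ((l2.map (fun j => l1.map (fun i => f i j))).flatten) := by
  induction l1 with
  | nil => simp
  | cons i t ih =>
    simp only [List.map_cons, List.flatten_cons]
    refine List.Perm.trans (ih.append_left _) ?_
    exact (pv_cons_flatten_perm (f i) (fun j => t.map (fun i => f i j)) l2).symm

-- element of the generated column list = the grid cell
theorem pv_col_at (lst : List (List Int)) (j i : Int) (n : Nat) (h0 : 0 ≤ i) (h1 : i < (n : Int)) :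
    pvAt ((PySem.List.pyRange 0 (n : Int)).map (fun i => pvCell lst i j)) i = pvCell lst i j := by
  have hk : i = ((i.toNat : Nat) : Int) := (Int.toNat_of_nonneg h0).symm
  rw [hk]
  exact PySem.List.pyGetD_map_pyRange (fun i => pvCell lst i j) n i.toNat 0 (by omega)

-- A's vertical double scan = B's guarded per-column slides
theorem pv_cols_eq (lst : List (List Int)) (N M b : Int) :
    (PySem.List.pyRange 0 (N - 3)).foldl (fun maxNum i =>
      (PySem.List.pyRange 0 M).foldl (fun maxNum j =>
        let tempNum := pvCell lst i j + pvCell lst (i+1) j + pvCell lst (i+2) j + pvCell lst (i+3) j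
        if tempNum > maxNum then tempNum else maxNum) maxNum) b
    = (if 4 ≤ N then
        (PySem.List.pyRange 0 M).foldl (fun best j =>
          pvSlide ((PySem.List.pyRange 0 N).map (fun i => pvCell lst i j)) N best) b
      else b) := by
  rcases em (4 ≤ N) with h4 | h4
  · rw [if_pos h4]
    obtain ⟨n, rfl⟩ : ∃ n : Nat, N = (n : Int) := ⟨N.toNat, by omega⟩
    -- left side as foldl max over the flattened row-major window list
    have hL : (PySem.List.pyRange 0 ((n : Int) - 3)).foldl (fun maxNum i =>
        (PySem.List.pyRange 0 M).foldl (fun maxNum j =>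
          let tempNum := pvCell lst i j + pvCell lst (i+1) j + pvCell lst (i+2) j + pvCell lst (i+3) j
          if tempNum > maxNum then tempNum else maxNum) maxNum) b
        = (((PySem.List.pyRange 0 ((n : Int) - 3)).map (fun i =>
            (PySem.List.pyRange 0 M).map (fun j =>
              pvCell lst i j + pvCell lst (i+1) j + pvCell lst (i+2) j + pvCell lst (i+3) j))).flatten).foldl max b := by
      rw [List.foldl_flatten, List.foldl_map]
      refine PySem.List.foldl_congr_mem _ _ _ b ?_
      intro acc i _
      rw [List.foldl_map]
      simp only [pv_if_max]
    -- right side as foldl max over the flattened column-major window list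
    have hR : (PySem.List.pyRange 0 M).foldl (fun best j =>
          pvSlide ((PySem.List.pyRange 0 (n : Int)).map (fun i => pvCell lst i j)) (n : Int) best) b
        = (((PySem.List.pyRange 0 M).map (fun j =>
            (PySem.List.pyRange 0 ((n : Int) - 3)).map (fun i =>
              pvCell lst i j + pvCell lst (i+1) j + pvCell lst (i+2) j + pvCell lst (i+3) j))).flatten).foldl max b := by
      rw [List.foldl_flatten, List.foldl_map]
      refine PySem.List.foldl_congr_mem _ _ _ b ?_
      intro acc j _
      rw [pvSlide_spec _ _ acc h4]
      congr 1
      refine List.map_congr_left ?_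
      intro i hi
      rw [PySem.List.mem_pyRange_one] at hi
      simp only [pvWin]
      rw [pv_col_at lst j i n (by omega) (by omega),
          pv_col_at lst j (i+1) n (by omega) (by omega),
          pv_col_at lst j (i+2) n (by omega) (by omega),
          pv_col_at lst j (i+3) n (by omega) (by omega)]
    rw [hL, hR]
    letI : RightCommutative (max : Int → Int → Int) := ⟨fun a b c => by omega⟩
    exact (pv_swap_perm (fun i j =>
      pvCell lst i j + pvCell lst (i+1) j + pvCell lst (i+2) j + pvCell lst (i+3) j)
      (PySem.List.pyRange 0 ((n : Int) - 3)) (PySem.List.pyRange 0 M)).foldl_eq b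
  · rw [if_neg h4, PySem.List.pyRange_one_eq_nil (a := 0) (b := N - 3) (by omega)]
    rfl

-- ===== VERDICT (by name: the statement is the Claim_ definition above) =====
theorem type1_spec : Claim_equal_type1 := by
  intro lst N M _ _
  unfold Spec_type1
  simp only [type1, type1_alt]
  rw [pv_rows_eq lst N M 0, pv_cols_eq lst N M _]
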